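-- pv_equiv track=rewrite | github.com/Pradeeprajpoot434680/Scraper | Extract_pdf_text/cleaning_text.py | clean_text_content
-- ===== SOURCE A (Python) =====
-- def clean_text_content(text: str) -> str:
--     # simple cleaning: strip repeated blank lines and header markers,
--     # and normalize whitespace
--     lines = []
--     prev_empty = False
--     for raw in text.splitlines():
--         line = raw.strip()
--         if not line:
--             if not prev_empty:
--                 lines.append("")
--             prev_empty = True
--         else:
--             # collapse header markers
--             if line.startswith("---") or line.startswith("Page "):
--                 lines.append("#")
--             else:
--                 lines.append(line)
--             prev_empty = False
--     return "\n".join(lines).strip() + "\n"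
-- ===== SOURCE B (Python) =====
-- def clean_text_content(text: str) -> str:
--     # map each line to its cleaned form, then collapse runs of blanks
--     transformed = []
--     for raw in text.splitlines():
--         s = raw.strip()
--         if not s:
--             transformed.append("")
--         elif s.startswith("---") or s.startswith("Page "):
--             transformed.append("#")
--         else:
--             transformed.append(s)
--     out = []
--     i = 0
--     n = len(transformed)
--     while i < n:
--         if transformed[i] == "":
--             out.append("")
--             while i < n and transformed[i] == "":
--                 i += 1
--         else:
--             out.append(transformed[i])
--             i += 1
--     return "\n".join(out).strip() + "\n"
-- ===== Notes on version B (the rewrite author's own statement) =====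
-- stated objective: alternative
-- what changed: Replaces the single flag-carrying scan with a two-phase pipeline: first map every line to its cleaned form, then collapse runs of consecutive blank lines into one by run-skipping instead of a prev_empty flag.
import Mathlib
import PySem

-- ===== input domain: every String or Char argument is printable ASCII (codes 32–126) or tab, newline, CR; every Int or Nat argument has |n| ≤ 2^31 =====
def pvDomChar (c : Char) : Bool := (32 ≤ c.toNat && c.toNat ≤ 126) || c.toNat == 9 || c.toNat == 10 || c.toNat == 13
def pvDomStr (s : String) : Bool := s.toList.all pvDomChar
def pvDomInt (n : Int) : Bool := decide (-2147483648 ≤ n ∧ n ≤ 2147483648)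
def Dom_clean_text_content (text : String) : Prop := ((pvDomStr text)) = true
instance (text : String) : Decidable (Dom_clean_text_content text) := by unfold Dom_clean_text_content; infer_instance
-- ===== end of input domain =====

-- B rebuilds A's single flag-carrying scan as a two-phase pipeline (map each line to its
-- cleaned form, then collapse runs of blanks); same cost, no speed claim.

-- ===== PORT A =====
-- A's for-loop: state = (accumulated lines, prev_empty flag).
def cleanALoop : List String → List String → Bool → List String
  | [], acc, _ => acc
  | raw :: rest, acc, prevEmpty =>
    let line := PySem.Str.strip raw
    if line = "" then
      if prevEmpty then cleanALoop rest acc true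
      else cleanALoop rest (acc ++ [""]) true
    else
      if PySem.Str.startswith line "---" || PySem.Str.startswith line "Page " then
        cleanALoop rest (acc ++ ["#"]) false
      else
        cleanALoop rest (acc ++ [line]) false

def clean_text_content (text : String) : String :=
  PySem.Str.strip (PySem.Str.join "\n" (cleanALoop (PySem.Str.splitlines text) [] false)) ++ "\n"

-- ===== PORT B =====
-- B phase 1: map each raw line to its cleaned form.
def cleanBLine (raw : String) : String :=
  let s := PySem.Str.strip raw
  if s = "" then ""
  else if PySem.Str.startswith s "---" || PySem.Str.startswith s "Page " then "#"
  else s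

-- B phase 2: collapse each run of consecutive blanks into a single blank
-- (the inner while loop that advances i past the run = dropWhile).
def cleanBCollapse : List String → List String
  | [] => []
  | l :: rest =>
    if l = "" then "" :: cleanBCollapse (rest.dropWhile (· = ""))
    else l :: cleanBCollapse rest
termination_by l => l.length
decreasing_by
  · have := (List.dropWhile_sublist (p := fun x => x = "") (l := rest)).length_le
    simpa using Nat.lt_succ_of_le this
  · simp

def clean_text_content_alt (text : String) : String :=
  PySem.Str.strip (PySem.Str.join "\n"
    (cleanBCollapse ((PySem.Str.splitlines text).map cleanBLine))) ++ "\n"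

-- ===== PRECONDITION & SPEC =====
def Spec_clean_text_content (text : String) (out : String) : Prop := out = clean_text_content_alt text
instance (text : String) (out : String) : Decidable (Spec_clean_text_content text out) := by unfold Spec_clean_text_content; infer_instance

-- ===== CLAIM (what is proved, stated in full; the proofs are below) =====
def Claim_equal_clean_text_content : Prop := ∀ (text : String), Dom_clean_text_content text → Spec_clean_text_content text (clean_text_content text)

-- ===== LEMMAS AND PROOFS =====

theorem cleanBLine_eq_empty_iff (raw : String) :
    cleanBLine raw = "" ↔ PySem.Str.strip raw = "" := by
  by_cases h : PySem.Str.strip raw = ""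
  · simp [cleanBLine, h]
  · simp [cleanBLine, h]
    split
    · decide
    · exact h

theorem cleanALoop_eq (ls : List String) : ∀ (acc : List String),
    (cleanALoop ls acc false = acc ++ cleanBCollapse (ls.map cleanBLine)) ∧
    (cleanALoop ls acc true = acc ++ cleanBCollapse ((ls.map cleanBLine).dropWhile (· = ""))) := by
  induction ls with
  | nil => intro acc; simp [cleanALoop, cleanBCollapse]
  | cons raw rest ih =>
    intro acc
    by_cases h : PySem.Str.strip raw = ""
    · have hb : cleanBLine raw = "" := (cleanBLine_eq_empty_iff raw).2 h
      constructor
      · rw [show cleanALoop (raw :: rest) acc false = cleanALoop rest (acc ++ [""]) true by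
          simp [cleanALoop, h]]
        rw [(ih (acc ++ [""])).2]
        simp [cleanBCollapse, hb]
      · rw [show cleanALoop (raw :: rest) acc true = cleanALoop rest acc true by
          simp [cleanALoop, h]]
        rw [(ih acc).2]
        simp [hb]
    · have hb : cleanBLine raw ≠ "" := fun hc => h ((cleanBLine_eq_empty_iff raw).1 hc)
      have hval : cleanBLine raw =
          (if PySem.Str.startswith (PySem.Str.strip raw) "---" ||
              PySem.Str.startswith (PySem.Str.strip raw) "Page " then "#"
           else PySem.Str.strip raw) := by
        simp [cleanBLine, h]
      have step : ∀ b : Bool, cleanALoop (raw :: rest) acc b =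
          cleanALoop rest (acc ++ [cleanBLine raw]) false := by
        intro b
        rw [hval]
        simp [cleanALoop, h]
        split <;> rfl
      constructor
      · rw [step false, (ih (acc ++ [cleanBLine raw])).1]
        simp [cleanBCollapse, hb]
      · rw [step true, (ih (acc ++ [cleanBLine raw])).1]
        simp [hb, cleanBCollapse]

-- ===== VERDICT (by name: the statement is the Claim_ definition above) =====
theorem clean_text_content_spec : Claim_equal_clean_text_content := by
  intro text _
  unfold Spec_clean_text_content clean_text_content clean_text_content_alt
  rw [(cleanALoop_eq (PySem.Str.splitlines text) []).1]
  simp
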